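-- pv_equiv track=rewrite | github.com/AlbertoV5/Waveform | Version1/parsons.py | GetPCode
-- ===== SOURCE A (Python) =====
-- def GetPCode(x,y):
--     value = 0
--     code = [value]
--     for i in range(len(y)-1):
--         if y[i+1] > y[i]:
--             value = value + 1
--             code.append(value)
--         elif y[i+1] == y[i]:
--             value = value
--             code.append(value)
--         elif y[i+1] < y[i]:
--             value = value - 1
--             code.append(value)
--     return code
-- ===== SOURCE B (Python) =====
-- def GetPCode(x, y):
--     # pass 1: per-step deltas from consecutive pairs
--     deltas = []
--     for a, b in zip(y, y[1:]):
--         if b > a: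
--             deltas.append(1)
--         elif b == a:
--             deltas.append(0)
--         elif b < a:
--             deltas.append(-1)
--     # pass 2: prefix sums starting at 0
--     code = [0]
--     for d in deltas:
--         code.append(code[-1] + d)
--     return code
-- ===== Notes on version B (the rewrite author's own statement) =====
-- stated objective: alternative
-- what changed: A's single fused loop carrying a running accumulator and appending it is split into two passes: one building the list of per-step deltas over zipped consecutive pairs, and one forming prefix sums of those deltas starting at 0.
import Mathlib
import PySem

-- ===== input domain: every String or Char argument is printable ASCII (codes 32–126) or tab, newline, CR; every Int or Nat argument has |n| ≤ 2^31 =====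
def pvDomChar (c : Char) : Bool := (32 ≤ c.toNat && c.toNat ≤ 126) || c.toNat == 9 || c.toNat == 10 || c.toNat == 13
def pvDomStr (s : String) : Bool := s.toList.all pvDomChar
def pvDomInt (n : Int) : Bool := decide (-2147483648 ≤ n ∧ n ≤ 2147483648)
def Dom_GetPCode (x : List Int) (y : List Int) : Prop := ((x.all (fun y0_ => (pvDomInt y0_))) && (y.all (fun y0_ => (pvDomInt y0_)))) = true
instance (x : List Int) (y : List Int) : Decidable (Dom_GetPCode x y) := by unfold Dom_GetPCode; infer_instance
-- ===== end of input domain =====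

-- B splits A's fused running-accumulator loop into a delta pass over consecutive pairs plus a prefix-sum pass (alternative decomposition, same cost).


-- ===== PORT A =====
-- loop body: state = (value, code); the three elif branches, else no-op
def GetPCodeBody (st : Int × List Int) (p : Int × Int) : Int × List Int :=
  if p.2 > p.1 then (st.1 + 1, st.2 ++ [st.1 + 1])
  else if p.2 = p.1 then (st.1, st.2 ++ [st.1])
  else if p.2 < p.1 then (st.1 - 1, st.2 ++ [st.1 - 1])
  else st

def GetPCode (x : List Int) (y : List Int) : List Int :=
  ((PySem.List.pyRange 0 ((y.length : Int) - 1) 1).foldl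
    (fun st i =>
      GetPCodeBody st (PySem.List.pyGetD y i 0, PySem.List.pyGetD y (i + 1) 0))
    (0, [0])).2

-- ===== PORT B =====
def GetPCode_alt (x : List Int) (y : List Int) : List Int :=
  ((y.zip y.tail).map
      (fun p => if p.2 > p.1 then (1 : Int) else if p.2 = p.1 then 0 else if p.2 < p.1 then -1 else 0)).foldl
    (fun code d => code ++ [PySem.List.pyGetD code (-1) 0 + d]) [0]

-- ===== PRECONDITION & SPEC =====
def Spec_GetPCode (x : List Int) (y : List Int) (out : List Int) : Prop := out = GetPCode_alt x y
instance (x : List Int) (y : List Int) (out : List Int) : Decidable (Spec_GetPCode x y out) := by unfold Spec_GetPCode; infer_instance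

-- ===== CLAIM (what is proved, stated in full; the proofs are below) =====
def Claim_equal_GetPCode : Prop := ∀ (x : List Int) (y : List Int), Dom_GetPCode x y → Spec_GetPCode x y (GetPCode x y)

-- ===== LEMMAS AND PROOFS =====

-- indexing the zip of y with its tail picks out the consecutive pair (y[j], y[j+1])
theorem pv_pair_get (y : List Int) (j : Int) (h0 : 0 ≤ j) (h1 : j < (y.length : Int) - 1) :
    PySem.List.pyGetD (y.zip y.tail) j (0, 0)
      = (PySem.List.pyGetD y j 0, PySem.List.pyGetD y (j + 1) 0) := by
  have hlen : (y.zip y.tail).length = y.length - 1 := by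
    rw [List.length_zip, List.length_tail]; omega
  have hj : j.toNat < (y.zip y.tail).length := by omega
  rw [PySem.List.pyGetD_eq_getElem (y.zip y.tail) (0, 0) h0 (by omega),
      PySem.List.pyGetD_eq_getElem y 0 h0 (by omega),
      PySem.List.pyGetD_eq_getElem y 0 (by omega) (by omega)]
  have := List.getElem_zip (l := y) (l' := y.tail) (i := j.toNat) (h := hj)
  rw [this]
  have ht : y.tail[j.toNat]'(by simp [List.length_tail]; omega) = y[(j+1).toNat]'(by omega) := by
    rw [List.getElem_tail]
    congr 1
    omega
  simp [ht]

-- core invariant: folding A's body over the pair list, starting from a nonempty code whose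
-- last element is the running value, yields B's prefix-sum fold over the mapped deltas
theorem pv_core (ps : List (Int × Int)) :
    ∀ (v : Int) (c : List Int), c ≠ [] → PySem.List.pyGetD c (-1) 0 = v →
    (ps.foldl GetPCodeBody (v, c)).2
      = (ps.map (fun p => if p.2 > p.1 then (1 : Int) else if p.2 = p.1 then 0 else if p.2 < p.1 then -1 else 0)).foldl
          (fun code d => code ++ [PySem.List.pyGetD code (-1) 0 + d]) c := by
  induction ps with
  | nil => intro v c _ _; simp
  | cons p t ih =>
    intro v c hc hv
    simp only [List.foldl_cons, List.map_cons]
    rcases lt_trichotomy p.1 p.2 with h | h | h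
    · have hgt : p.2 > p.1 := h
      rw [show GetPCodeBody (v, c) p = (v + 1, c ++ [v + 1]) by
            simp [GetPCodeBody, hgt]]
      rw [ih (v + 1) (c ++ [v + 1]) (by simp) (by rw [PySem.List.pyGetD_neg_one_append_singleton])]
      simp [hgt, hv]
    · rw [show GetPCodeBody (v, c) p = (v, c ++ [v]) by
            simp [GetPCodeBody, h]]
      rw [ih v (c ++ [v]) (by simp) (by rw [PySem.List.pyGetD_neg_one_append_singleton])]
      have : ¬ p.1 < p.2 := by omega
      simp [h, hv]
    · have hlt : p.2 < p.1 := h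
      have hne : ¬ p.2 = p.1 := by omega
      have hngt : ¬ p.1 < p.2 := by omega
      rw [show GetPCodeBody (v, c) p = (v - 1, c ++ [v - 1]) by
            simp [GetPCodeBody, hngt, hne, hlt]]
      rw [ih (v - 1) (c ++ [v - 1]) (by simp) (by rw [PySem.List.pyGetD_neg_one_append_singleton])]
      simp [hngt, hne, hlt, hv]
      ring_nf

-- ===== VERDICT (by name: the statement is the Claim_ definition above) =====
theorem GetPCode_spec : Claim_equal_GetPCode := by
  intro x y _
  unfold Spec_GetPCode GetPCode GetPCode_alt
  rcases y with _ | ⟨a, t⟩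
  · simp [PySem.List.pyRange_one_eq_nil]
  · have hlen : ((((a :: t).zip (a :: t).tail).length : Int)) = ((a :: t).length : Int) - 1 := by
      simp [List.length_zip]
    rw [show ((((a :: t).length : Int)) - 1) = (((a :: t).zip (a :: t).tail).length : Int) by omega]
    rw [PySem.List.foldl_congr_mem
        (PySem.List.pyRange 0 ((((a :: t).zip (a :: t).tail).length : Int)))
        (fun st i => GetPCodeBody st (PySem.List.pyGetD (a :: t) i 0, PySem.List.pyGetD (a :: t) (i + 1) 0))
        (fun st j => GetPCodeBody st (PySem.List.pyGetD ((a :: t).zip (a :: t).tail) j (0, 0)))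
        ((0 : Int), ([0] : List Int))
        (fun acc j hj => by
          rw [PySem.List.mem_pyRange_one] at hj
          simp only [← pv_pair_get (a :: t) j hj.1 (by omega)])]
    rw [PySem.List.foldl_pyRange_zero_pyGetD' ((a :: t).zip (a :: t).tail) ((0 : Int), (0 : Int)) GetPCodeBody ((0 : Int), ([0] : List Int))]
    exact pv_core _ 0 [0] (by simp) (by decide)
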